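-- pv_equiv track=rewrite | github.com/comp-hci-lab/cscw_21_wikipedia | edittypes/edit_utils.py | get_observations_by_paragraph
-- ===== SOURCE A (Python) =====
-- def get_observations_by_paragraph(operations_with_para_context):
--     # returns list of lists of operations in the same paragraph
--     paragraphs = []
--     for obs in operations_with_para_context:
--         opr = obs[0]
--         data = obs[1]
--         context_before = data[0][1]
--         if opr == 'equal':
--             continue
--         # add a new list for paragraph
--         if not paragraphs:
--             paragraphs.append([])
--         else:
--             # check if not same paragraph
--             last_obs = paragraphs[-1][-1]
--             last_data = last_obs[1]
--             # Use last_context_before as a default to compare against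
--             # context_before
--             last_context_before = last_data[0][1]
--             # If last_context_before is empty, we need to compare against the
--             # deleted segment as the starting of the paragraph is deleted.
--             if last_context_before == '' and \
--                     (last_obs[0] == 'deleted' or last_obs[0] == 'replace'):
--                 last_context_before = last_data[1][1]
--             end = min(len(context_before), len(last_context_before))
--
--             # If the context_before is empty, its a new paragraphs
--             if (len(context_before) == 0 ) :
--                 paragraphs.append([])
--             # if their contexts are not the same, they are in different paragraphs
--             elif context_before[:end] != last_context_before[:end]:
--                 paragraphs.append([])
--
--         # append current observation
--         paragraphs[-1].append(obs)
--     return paragraphs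
-- ===== SOURCE B (Python) =====
-- # B: filter first, then build the paragraph groups back-to-front in one reversed pass.
-- def _new_para(prev, cur):
--     context_before = cur[1][0][1]
--     last_context_before = prev[1][0][1]
--     if last_context_before == '' and prev[0] in ('deleted', 'replace'):
--         last_context_before = prev[1][1][1]
--     end = min(len(context_before), len(last_context_before))
--     return len(context_before) == 0 or context_before[:end] != last_context_before[:end]
--
-- def get_observations_by_paragraph(operations_with_para_context):
--     kept = [obs for obs in operations_with_para_context
--             if obs[0] != 'equal']
--     groups = []
--     for obs in reversed(kept):
--         if groups and not _new_para(obs, groups[0][0]):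
--             groups[0] = [obs] + groups[0]
--         else:
--             groups = [[obs]] + groups
--     return groups
-- ===== Notes on version B (the rewrite author's own statement) =====
-- stated objective: alternative
-- what changed: B filters out the 'equal' operations up front and builds the paragraph groups back-to-front in a single pass over the reversed kept list (prepending into the first group or starting a new one), instead of A's forward loop that mutates the last sublist of a growing result and re-reads its last element each iteration.
import Mathlib
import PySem

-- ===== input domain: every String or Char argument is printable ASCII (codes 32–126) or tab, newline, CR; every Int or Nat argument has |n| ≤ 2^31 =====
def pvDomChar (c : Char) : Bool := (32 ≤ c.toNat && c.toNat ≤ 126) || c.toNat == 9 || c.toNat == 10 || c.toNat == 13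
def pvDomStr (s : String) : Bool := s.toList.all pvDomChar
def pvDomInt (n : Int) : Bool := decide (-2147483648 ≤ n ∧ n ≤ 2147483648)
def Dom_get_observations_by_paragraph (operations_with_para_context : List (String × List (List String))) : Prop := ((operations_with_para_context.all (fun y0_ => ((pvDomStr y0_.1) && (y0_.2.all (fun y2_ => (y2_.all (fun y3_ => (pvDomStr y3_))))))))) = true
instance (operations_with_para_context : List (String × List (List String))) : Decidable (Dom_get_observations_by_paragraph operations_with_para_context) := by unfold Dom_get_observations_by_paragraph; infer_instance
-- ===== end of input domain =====

-- B filters the non-'equal' observations first and builds the paragraph groups back-to-front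
-- in a single reversed pass (objective: alternative decomposition, same cost).


-- ===== PORT A =====
-- one loop iteration of A (paragraphs state; obs[1][0][1] etc. via pyGetD, in range under Pre_)
def pvStepA (paragraphs : List (List (String × List (List String)))) (obs : String × List (List String)) : List (List (String × List (List String))) :=
  let opr := obs.1
  let data := obs.2
  let context_before := PySem.List.pyGetD (PySem.List.pyGetD data 0 []) 1 ""
  if opr == "equal" then paragraphs
  else
    let paragraphs :=
      if paragraphs.isEmpty then paragraphs ++ [[]]
      else
        let last_obs := PySem.List.pyGetD (PySem.List.pyGetD paragraphs (-1) []) (-1) ("", [])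
        let last_data := last_obs.2
        let last_context_before := PySem.List.pyGetD (PySem.List.pyGetD last_data 0 []) 1 ""
        let last_context_before :=
          if last_context_before == "" && (last_obs.1 == "deleted" || last_obs.1 == "replace")
          then PySem.List.pyGetD (PySem.List.pyGetD last_data 1 []) 1 ""
          else last_context_before
        let e := min (PySem.Str.len context_before) (PySem.Str.len last_context_before)
        if PySem.Str.len context_before == 0 then paragraphs ++ [[]]
        else if PySem.Str.slice context_before none (some e) != PySem.Str.slice last_context_before none (some e)
        then paragraphs ++ [[]]
        else paragraphs
    paragraphs.dropLast ++ [paragraphs.getLastD [] ++ [obs]]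

def get_observations_by_paragraph (operations_with_para_context : List (String × List (List String))) : List (List (String × List (List String))) :=
  operations_with_para_context.foldl pvStepA []

-- ===== PORT B =====
-- the boundary predicate _new_para of Source B
def pvNewPara (prev cur : String × List (List String)) : Bool :=
  let context_before := PySem.List.pyGetD (PySem.List.pyGetD cur.2 0 []) 1 ""
  let last_context_before := PySem.List.pyGetD (PySem.List.pyGetD prev.2 0 []) 1 ""
  let last_context_before :=
    if last_context_before == "" && (prev.1 == "deleted" || prev.1 == "replace")
    then PySem.List.pyGetD (PySem.List.pyGetD prev.2 1 []) 1 ""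
    else last_context_before
  let e := min (PySem.Str.len context_before) (PySem.Str.len last_context_before)
  PySem.Str.len context_before == 0 ||
    PySem.Str.slice context_before none (some e) != PySem.Str.slice last_context_before none (some e)

-- one iteration of Source B's reversed loop (groups built back-to-front)
def pvStepB (groups : List (List (String × List (List String)))) (obs : String × List (List String)) : List (List (String × List (List String))) :=
  if !groups.isEmpty && !pvNewPara obs ((groups.headD []).headD ("", [])) then
    ([obs] ++ groups.headD []) :: groups.tail
  else
    [[obs]] ++ groups

def get_observations_by_paragraph_alt (operations_with_para_context : List (String × List (List String))) : List (List (String × List (List String))) :=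
  let kept := operations_with_para_context.filter (fun obs => obs.1 != "equal")
  kept.reverse.foldl pvStepB []

-- ===== PRECONDITION & SPEC =====
-- obs[1] must have a first element with at least two entries (A reads data[0][1] on EVERY obs,
-- including 'equal' ones, before skipping)
def pvShapeOK (o : String × List (List String)) : Prop := 1 ≤ o.2.length ∧ 2 ≤ (o.2.headD []).length
-- when the empty-context fallback fires on a deleted/replace observation, data[1][1] must exist
def pvFbOK (o : String × List (List String)) : Prop :=
  ((o.2.headD []).getD 1 "" = "" ∧ (o.1 = "deleted" ∨ o.1 = "replace")) → (2 ≤ o.2.length ∧ 2 ≤ (o.2.getD 1 []).length)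

-- Pre_ excludes exactly the inputs on which Python A raises IndexError: some obs lacks data[0][1],
-- or the empty-context fallback reads a missing data[1][1] on a non-final kept observation.
def Pre_get_observations_by_paragraph (operations_with_para_context : List (String × List (List String))) : Prop :=
  (∀ o ∈ operations_with_para_context, pvShapeOK o) ∧
  (∀ o ∈ (operations_with_para_context.filter (fun obs => obs.1 != "equal")).dropLast, pvFbOK o)
instance (operations_with_para_context : List (String × List (List String))) : Decidable (Pre_get_observations_by_paragraph operations_with_para_context) := by unfold Pre_get_observations_by_paragraph pvShapeOK pvFbOK; infer_instance

def pvWitness_get_observations_by_paragraph : (List (String × List (List String))) :=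
  [("replace", [["x", "abc"], ["y", "d"]]), ("inserted", [["z", "abq"], ["w", "e"]])]

def Spec_get_observations_by_paragraph (operations_with_para_context : List (String × List (List String))) (out : List (List (String × List (List String)))) : Prop := out = get_observations_by_paragraph_alt operations_with_para_context
instance (operations_with_para_context : List (String × List (List String))) (out : List (List (String × List (List String)))) : Decidable (Spec_get_observations_by_paragraph operations_with_para_context out) := by unfold Spec_get_observations_by_paragraph; infer_instance

-- ===== CLAIM (what is proved, stated in full; the proofs are below) =====
def Claim_equal_get_observations_by_paragraph : Prop := ∀ (operations_with_para_context : List (String × List (List String))), Dom_get_observations_by_paragraph operations_with_para_context → Pre_get_observations_by_paragraph operations_with_para_context → Spec_get_observations_by_paragraph operations_with_para_context (get_observations_by_paragraph operations_with_para_context)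


-- ===== LEMMAS AND PROOFS =====

-- B's reversed loop as a right fold
def pvG (xs : List (String × List (List String))) : List (List (String × List (List String))) :=
  List.foldr (fun x g => pvStepB g x) [] xs

lemma pvG_cons (x : String × List (List String)) (xs : List (String × List (List String))) :
    pvG (x :: xs) = match pvG xs with
      | [] => [[x]]
      | g :: gs => if pvNewPara x (g.headD ("", [])) then [x] :: g :: gs else (x :: g) :: gs := by
  show pvStepB (pvG xs) x = _
  cases h : pvG xs with
  | nil => simp [pvStepB]
  | cons g gs =>
    simp only [pvStepB, List.isEmpty_cons, List.headD_cons, List.tail_cons, Bool.not_false,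
      Bool.true_and]
    cases hb : pvNewPara x (g.headD ("", [])) <;>
      simp_all [List.headD_eq_head?_getD]

lemma pvG_head (x : String × List (List String)) (xs : List (String × List (List String))) :
    ∃ t gs, pvG (x :: xs) = (x :: t) :: gs := by
  rw [pvG_cons]
  cases h : pvG xs with
  | nil => exact ⟨[], [], rfl⟩
  | cons g gs =>
    cases hb : pvNewPara x (g.headD ("", [])) with
    | true =>
      rw [List.headD_eq_head?_getD] at hb
      exact ⟨[], g :: gs, by simp [hb]⟩
    | false =>
      rw [List.headD_eq_head?_getD] at hb
      exact ⟨g, gs, by simp [hb]⟩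

def pvGlue (prev : String × List (List String)) (cur : List (String × List (List String)))
    (groups : List (List (String × List (List String)))) : List (List (String × List (List String))) :=
  match groups with
  | [] => [cur]
  | g :: gs => if pvNewPara prev (g.headD ("", [])) then cur :: g :: gs else (cur ++ g) :: gs

lemma pvGlue_self (x : String × List (List String)) (xs : List (String × List (List String))) :
    pvGlue x [x] (pvG xs) = pvG (x :: xs) := by
  rw [pvG_cons]
  cases h : pvG xs with
  | nil => rfl
  | cons g gs =>
    cases hb : pvNewPara x (g.headD ("", [])) <;>
      · rw [List.headD_eq_head?_getD] at hb
        simp [pvGlue, hb]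

lemma pvGlue_merge (x : String × List (List String)) (xs : List (String × List (List String)))
    (c : List (String × List (List String))) :
    pvGlue x (c ++ [x]) (pvG xs) =
      match pvG (x :: xs) with
      | [] => [c]
      | g :: gs => (c ++ g) :: gs := by
  rw [pvG_cons]
  cases h : pvG xs with
  | nil => rfl
  | cons g gs =>
    cases hb : pvNewPara x (g.headD ("", [])) <;>
      · rw [List.headD_eq_head?_getD] at hb
        simp [pvGlue, hb]

lemma pvStepA_eq (paragraphs : List (List (String × List (List String))))
    (x : String × List (List String)) (hx : (x.1 == "equal") = false)
    (prev : String × List (List String)) (hne : paragraphs.isEmpty = false)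
    (hprev : PySem.List.pyGetD (PySem.List.pyGetD paragraphs (-1) []) (-1) ("", []) = prev) :
    pvStepA paragraphs x =
      if pvNewPara prev x then paragraphs ++ [[x]]
      else paragraphs.dropLast ++ [paragraphs.getLastD [] ++ [x]] := by
  simp only [pvStepA, hx, Bool.false_eq_true, if_false, hne, hprev]
  cases hb : pvNewPara prev x with
  | true =>
    simp only [pvNewPara] at hb
    rcases Bool.or_eq_true_iff.mp hb with h1 | h2
    · rw [h1]
      simp [List.dropLast_concat, List.getLastD_concat]
    · by_cases h1 : (PySem.Str.len (PySem.List.pyGetD (PySem.List.pyGetD x.2 0 []) 1 "") == 0) = true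
      · rw [h1]; simp [List.dropLast_concat, List.getLastD_concat]
      · rw [Bool.eq_false_iff.mpr h1, h2]
        simp [List.dropLast_concat, List.getLastD_concat]
  | false =>
    simp only [pvNewPara] at hb
    obtain ⟨h1, h2⟩ := Bool.or_eq_false_iff.mp hb
    rw [h1, h2]
    simp

lemma pvMain (xs : List (String × List (List String)))
    (acc : List (List (String × List (List String))))
    (c : List (String × List (List String))) (prev : String × List (List String))
    (hxs : ∀ x ∈ xs, (x.1 == "equal") = false) :
    List.foldl pvStepA (acc ++ [c ++ [prev]]) xs = acc ++ pvGlue prev (c ++ [prev]) (pvG xs) := by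
  induction xs generalizing acc c prev with
  | nil => simp [pvG, pvGlue]
  | cons x rest ih =>
    have hx : (x.1 == "equal") = false := hxs x (List.mem_cons_self ..)
    have hrest : ∀ y ∈ rest, (y.1 == "equal") = false := fun y hy => hxs y (List.mem_cons_of_mem _ hy)
    have hne : (acc ++ [c ++ [prev]]).isEmpty = false := by simp
    have hlast : PySem.List.pyGetD (PySem.List.pyGetD (acc ++ [c ++ [prev]]) (-1) []) (-1) ("", [])
        = prev := by
      rw [PySem.List.pyGetD_neg_one_append_singleton, PySem.List.pyGetD_neg_one_append_singleton]
    rw [List.foldl_cons, pvStepA_eq _ x hx prev hne hlast]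
    obtain ⟨t, gs, hg⟩ := pvG_head x rest
    cases hnp : pvNewPara prev x with
    | true =>
      rw [if_pos rfl]
      rw [show (acc ++ [c ++ [prev]]) ++ [[x]] = (acc ++ [c ++ [prev]]) ++ [[] ++ [x]] from rfl]
      rw [ih (acc ++ [c ++ [prev]]) [] x hrest]
      rw [show ([] : List (String × List (List String))) ++ [x] = [x] from rfl]
      rw [pvGlue_self, hg]
      simp [pvGlue, hg, hnp]
    | false =>
      rw [if_neg (by simp [hnp])]
      rw [show (acc ++ [c ++ [prev]]).dropLast = acc from List.dropLast_concat ..,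
          show (acc ++ [c ++ [prev]]).getLastD [] = c ++ [prev] from List.getLastD_concat ..]
      rw [ih acc (c ++ [prev]) x hrest]
      rw [pvGlue_merge, hg]
      simp [pvGlue, hg, hnp]

lemma pvFold_filter (ops : List (String × List (List String)))
    (init : List (List (String × List (List String)))) :
    List.foldl pvStepA init ops = List.foldl pvStepA init (ops.filter (fun obs => obs.1 != "equal")) := by
  induction ops generalizing init with
  | nil => rfl
  | cons x rest ih =>
    by_cases hx : (x.1 == "equal") = true
    · have hxe : x.1 = "equal" := by simpa using hx
      have hid : pvStepA init x = init := by simp [pvStepA, hx]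
      simp [List.filter_cons, hxe, hid, ih]
    · have hxe : ¬ x.1 = "equal" := by simpa using hx
      simp [List.filter_cons, hxe, ih]

-- ===== VERDICT (by name: the statement is the Claim_ definition above) =====
theorem get_observations_by_paragraph_spec : Claim_equal_get_observations_by_paragraph := by
  intro ops _ _
  unfold Spec_get_observations_by_paragraph get_observations_by_paragraph get_observations_by_paragraph_alt
  rw [pvFold_filter]
  rw [List.foldl_reverse]
  have hk : ∀ x ∈ ops.filter (fun obs => obs.1 != "equal"), (x.1 == "equal") = false := by
    intro x hx
    have := (List.mem_filter.mp hx).2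
    simpa [bne] using this
  cases hkept : ops.filter (fun obs => obs.1 != "equal") with
  | nil => rfl
  | cons x rest =>
    rw [hkept] at hk
    have hx : (x.1 == "equal") = false := hk x (List.mem_cons_self ..)
    have hrest : ∀ y ∈ rest, (y.1 == "equal") = false := fun y hy => hk y (List.mem_cons_of_mem _ hy)
    have hfirst : pvStepA [] x = [] ++ [[] ++ [x]] := by
      simp [pvStepA, hx]
    rw [List.foldl_cons, hfirst, pvMain rest [] [] x hrest]
    rw [show ([] : List (String × List (List String))) ++ [x] = [x] from rfl]
    rw [pvGlue_self]
    rfl
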